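/- GENERATED by farm/mkstatement.py from design/units.tsv (unit `start_decoder.9a`) and the assertions of Vorbis/Spec/StartDecoder9.lean — do not edit.
   THE STATEMENT of the proof unit `start_decoder.9a`: segment 9a of `start_decoder` (5 instructions; entries 0x114184;
   exits 0x113b22,0x114199; ranges 0x114184-0x114194)
   takes each of its entry assertions to one of its exit assertions (`Vorbis.Spec.StartDecoder.Seg9a`), given the contracts of its callees.
   What the names mean: Vorbis/Spec/Basic.lean (the shared hypotheses), Vorbis/Spec/StartDecoder9.lean (the assertions). The theorem to prove:
   `theorem start_decoder_9a_ok : Vorbis.Spec.start_decoder_9a.Statement`. -/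
import Vorbis.Spec.Alloc
import Vorbis.Spec.Reader
import Vorbis.Spec.StartDecoder9
namespace Vorbis.Spec.start_decoder_9a
open X86 X86.User Asan

/-- The statement of unit `start_decoder.9a`. -/
def Statement : Prop :=
  ∀ (Lay : Layout) (_hLay : Lay.hi = 0x1000000) (μ : Microarch) (_hμ : UserX.MicroOK μ) (u₀ : State)
    (_hcode : HasCodeNat Lay u₀ Vorbis.L.start_decoder.entry Vorbis.Code.code_start_decoder.nat Vorbis.L.start_decoder.size)
    (_h_start_packet : ∀ (others : List Obj) (frames : List (Nat × FrameLayout)) (Blk : Block → Prop) (len : Nat), Calls Lay μ Vorbis.WayInv (Vorbis.conv u₀) Vorbis.L.start_packet.entry (Vorbis.Spec.start_packet.spec others frames Blk len))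
    (_h_crc32_init : ∀ (others : List Obj) (frames : List (Nat × FrameLayout)), Calls Lay μ Vorbis.WayInv (Vorbis.conv u₀) Vorbis.L.crc32_init.entry (Vorbis.Spec.crc32_init.spec others frames)),
    Vorbis.Spec.StartDecoder.Seg9a Lay μ u₀

end Vorbis.Spec.start_decoder_9a
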